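-- pv_equiv track=rewrite | github.com/shovon74/AlgorithmsInPython | Miscellaneous/SimpleSymbols.py | SimpleSymbols
-- ===== SOURCE A (Python) =====
-- def SimpleSymbols(str):
--     str = '=' + str + '='
--     alpha = ['a', 'b', 'c', 'd', 'e', 'f', 'g', 'h', 'i', 'j', 'k', 'l', 'm', 'n', 'o', 'p', 'q', 'r', 's', 't', 'u', 'v', 'w', 'x', 'y', 'z']
--     for i in range(len(str)):
--         if str[i] in alpha:
--             if str[i-1] != '+' or str[i+1] != '+':
--                 return 'false'
--
--     return 'true'
-- ===== SOURCE B (Python) =====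
-- def SimpleSymbols(str):
--     prev = None
--     pending = False  # previous char was a lowercase letter still needing a following '+'
--     for c in str:
--         if pending and c != '+':
--             return 'false'
--         if c.islower():
--             if prev != '+':
--                 return 'false'
--             pending = True
--         else:
--             pending = False
--         prev = c
--     return 'false' if pending else 'true'
-- ===== Notes on version B (the rewrite author's own statement) =====
-- stated objective: alternative
-- what changed: Replaces A's padded copy and index loop with [i-1]/[i+1] lookups by a single one-pass state machine over the unpadded string that tracks the previous character and a pending flag requiring the next character to be a plus.
import Mathlib
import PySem

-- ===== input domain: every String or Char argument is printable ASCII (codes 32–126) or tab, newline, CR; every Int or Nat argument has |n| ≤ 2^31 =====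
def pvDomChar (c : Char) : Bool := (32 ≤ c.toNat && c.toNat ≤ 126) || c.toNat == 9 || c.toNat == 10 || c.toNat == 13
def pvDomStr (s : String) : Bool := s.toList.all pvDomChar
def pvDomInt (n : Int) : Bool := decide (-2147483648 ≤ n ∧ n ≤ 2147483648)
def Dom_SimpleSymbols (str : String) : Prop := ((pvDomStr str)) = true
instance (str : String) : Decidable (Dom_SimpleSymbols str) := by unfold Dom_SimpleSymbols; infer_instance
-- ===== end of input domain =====

-- B replaces A's padded index scan (with its [i-1]/[i+1] lookups) by a single
-- one-pass state machine over the unpadded string tracking the previous character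
-- and a pending flag (the next character must be a plus); objective: alternative decomposition.

-- ===== PORT A =====
def alphaA : List Char := ['a','b','c','d','e','f','g','h','i','j','k','l','m','n','o','p','q','r','s','t','u','v','w','x','y','z']

-- the for-i-in-range loop of A; `none` branches are unreachable (i±1 stays in range
-- whenever str[i] is a letter, since both ends of the padded list are '=')
def aGo (l : List Char) : List Int → String
  | [] => "true"
  | i :: rest =>
    match PySem.List.pyGet? l i with
    | some c =>
      if c ∈ alphaA then
        if PySem.List.pyGet? l (i - 1) ≠ some '+' ∨ PySem.List.pyGet? l (i + 1) ≠ some '+' then "false"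
        else aGo l rest
      else aGo l rest
    | none => "false"

def SimpleSymbols (str : String) : String :=
  let l : List Char := ('=' :: str.toList) ++ ['=']
  aGo l (PySem.List.pyRange 0 (l.length : Int) 1)

-- ===== PORT B =====
-- the one-pass loop of Source B: prev = previous char, pending = previous char was a
-- lowercase letter still needing a following '+'  (c.islower() = PySem.Chars.islower,
-- exact on the ASCII domain)
def bGo : List Char → Option Char → Bool → String
  | [], _, pending => if pending then "false" else "true"
  | c :: rest, prev, pending =>
    if pending && decide (c ≠ '+') then "false"
    else if PySem.Chars.islower c then
      if prev ≠ some '+' then "false" else bGo rest (some c) true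
    else bGo rest (some c) false

def SimpleSymbols_alt (str : String) : String := bGo str.toList none false

-- ===== PRECONDITION & SPEC =====
def Spec_SimpleSymbols (str : String) (out : String) : Prop := out = SimpleSymbols_alt str
instance (str : String) (out : String) : Decidable (Spec_SimpleSymbols str out) := by unfold Spec_SimpleSymbols; infer_instance

-- ===== CLAIM (what is proved, stated in full; the proofs are below) =====
def Claim_equal_SimpleSymbols : Prop := ∀ (str : String), Dom_SimpleSymbols str → Spec_SimpleSymbols str (SimpleSymbols str)

-- ===== LEMMAS AND PROOFS =====

-- intermediate structural form of A's scan: d is the already-validated previous char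
def aScan (d : Char) : List Char → String
  | [] => "true"
  | c :: rest =>
    if PySem.Chars.islower c then
      if d ≠ '+' ∨ rest.headD '=' ≠ '+' then "false" else aScan c rest
    else aScan c rest

lemma char_ofNat_toNat (c : Char) : Char.ofNat c.toNat = c := by
  rcases c with ⟨⟨cv, hcv⟩, hc⟩
  simp only [Char.ofNat, Char.toNat, UInt32.toNat]
  rw [dif_pos (by exact hc)]
  apply Char.ext
  simp [Char.ofNatAux]

lemma mem_alphaA (c : Char) : (c ∈ alphaA) ↔ PySem.Chars.islower c = true := by
  constructor
  · intro h; fin_cases h <;> decide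
  · intro h
    simp only [PySem.Chars.islower, Bool.and_eq_true, decide_eq_true_eq, Char.le_def] at h
    have h1 : 97 ≤ c.toNat := h.1
    have h2 : c.toNat ≤ 122 := h.2
    have halpha : alphaA = (List.range' 97 26).map Char.ofNat := by decide
    rw [halpha, List.mem_map]
    exact ⟨c.toNat, by rw [List.mem_range'_1]; omega, char_ofNat_toNat c⟩

-- A's indexed loop from position j equals the structural scan over the suffix
lemma aGo_eq_aScan (n : Nat) : ∀ (l : List Char) (j : Nat) (d : Char),
    l.length - j = n → 1 ≤ j → j ≤ l.length → l[j-1]? = some d →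
    aGo l (PySem.List.pyRange j l.length 1) = aScan d (l.drop j) := by
  induction n with
  | zero =>
    intro l j d hn h1 h2 hd
    have hj : j = l.length := by omega
    subst hj
    rw [PySem.List.pyRange_one_eq_nil (by omega), List.drop_length]
    rfl
  | succ n ih =>
    intro l j d hn h1 h2 hd
    have hjlt : j < l.length := by omega
    rw [PySem.List.pyRange_one_cons (by exact_mod_cast hjlt)]
    have hdropj : l.drop j = l[j] :: l.drop (j+1) := List.drop_eq_getElem_cons hjlt
    have hget : PySem.List.pyGet? l (j : Int) = some l[j] := by
      rw [PySem.List.pyGet?_natCast, List.getElem?_eq_getElem hjlt]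
    have hgetm1 : PySem.List.pyGet? l ((j : Int) - 1) = some d := by
      have : (j : Int) - 1 = ((j - 1 : Nat) : Int) := by omega
      rw [this, PySem.List.pyGet?_natCast, hd]
    have hgetp1eq : (PySem.List.pyGet? l ((j : Int) + 1) ≠ some '+') ↔ ((l.drop (j+1)).headD '=' ≠ '+') := by
      rcases Nat.lt_or_ge (j+1) l.length with hlt | hge
      · have : (j : Int) + 1 = ((j + 1 : Nat) : Int) := by omega
        rw [this, PySem.List.pyGet?_natCast, List.getElem?_eq_getElem hlt]
        rw [List.drop_eq_getElem_cons hlt]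
        simp [List.getElem?_eq_getElem hlt]
      · have hd1 : l.drop (j+1) = [] := List.drop_eq_nil_of_le hge
        have : PySem.List.pyGet? l ((j : Int) + 1) = none := by
          rw [PySem.List.pyGet?_eq_none_iff, PySem.Raise.InRange]
          omega
        rw [this, hd1]
        simp
    show aGo l ((j : Int) :: PySem.List.pyRange ((j : Int) + 1) l.length 1) = _
    rw [hdropj]
    simp only [aGo, hget, aScan]
    have hrec : aGo l (PySem.List.pyRange ((j : Int) + 1) (l.length : Int) 1)
        = aScan l[j] (l.drop (j+1)) := by
      have : ((j : Int) + 1) = ((j + 1 : Nat) : Int) := by omega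
      rw [this]
      apply ih l (j+1) l[j] (by omega) (by omega) (by omega)
      simp [List.getElem?_eq_getElem hjlt]
    by_cases hmem : l[j] ∈ alphaA
    · rw [if_pos hmem, if_pos ((mem_alphaA _).mp hmem)]
      have hdne : (some d ≠ some '+') ↔ (d ≠ '+') := by simp
      rw [hgetm1]
      by_cases hc : d ≠ '+' ∨ (l.drop (j+1)).headD '=' ≠ '+'
      · rw [if_pos (by tauto), if_pos hc]
      · rw [if_neg (by tauto), if_neg hc]
        exact hrec
    · rw [if_neg hmem, if_neg (fun h => hmem ((mem_alphaA _).mpr h))]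
      exact hrec

-- one step of B from a still-open pending flag on a wrong next char returns "false"
lemma bGo_pending_false (cs : List Char) (prev : Option Char)
    (h : cs.headD '=' ≠ '+') : bGo cs prev true = "false" := by
  cases cs with
  | nil => rfl
  | cons c rest =>
    simp only [List.headD_cons] at h
    simp [bGo, h]

-- B's result does not depend on a non-'+' initial prev
lemma bGo_prev_irrel (cs : List Char) (b : Bool) (p q : Option Char)
    (hp : p ≠ some '+') (hq : q ≠ some '+') : bGo cs p b = bGo cs q b := by
  cases cs with
  | nil => rfl
  | cons c rest => simp [bGo, hp, hq]

-- the crux: A's structural scan agrees with B's state machine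
lemma aScan_eq_bGo : ∀ (cs : List Char) (d : Char),
    (PySem.Chars.islower d = true → cs.headD '=' = '+') →
    aScan d (cs ++ ['=']) = bGo cs (some d) (PySem.Chars.islower d) := by
  intro cs
  induction cs with
  | nil =>
    intro d hinv
    cases hld : PySem.Chars.islower d with
    | true => exact absurd (hinv hld) (by decide)
    | false => simp [aScan, bGo, show PySem.Chars.islower '=' = false by decide]
  | cons c rest ih =>
    intro d hinv
    have hfirst : (PySem.Chars.islower d && decide (c ≠ '+')) = false := by
      cases hld : PySem.Chars.islower d with
      | true => have hcp := hinv hld; simp only [List.headD_cons] at hcp; simp [hcp]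
      | false => simp
    show aScan d (c :: (rest ++ ['='])) = _
    simp only [aScan, bGo, hfirst, Bool.false_eq_true, if_false]
    have hhead : (rest ++ ['=']).headD '=' = rest.headD '=' := by cases rest <;> rfl
    cases hlc : PySem.Chars.islower c with
    | false =>
      simp only [Bool.false_eq_true, if_false]
      rw [ih c (by simp [hlc])]
      rw [hlc]
    | true =>
      simp only [if_true]
      by_cases hdp : d = '+'
      · subst hdp
        simp only [ne_eq, not_true_eq_false, false_or, hhead]
        by_cases hr : rest.headD '=' ≠ '+'
        · rw [if_pos hr, bGo_pending_false rest (some c) hr]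
          simp
        · rw [if_neg hr]
          simp only [ne_eq, not_not] at hr
          rw [ih c (fun _ => hr), hlc]
          simp
      · have : d ≠ '+' ∨ (rest ++ ['=']).headD '=' ≠ '+' := Or.inl hdp
        rw [if_pos this, if_pos (by simpa using hdp)]

-- ===== VERDICT (by name: the statement is the Claim_ definition above) =====
theorem SimpleSymbols_spec : Claim_equal_SimpleSymbols := by
  intro str _
  unfold Spec_SimpleSymbols
  show SimpleSymbols str = SimpleSymbols_alt str
  simp only [SimpleSymbols, SimpleSymbols_alt]
  set cs := str.toList with hcs
  set l : List Char := ('=' :: cs) ++ ['='] with hl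
  have hlen : l.length = cs.length + 2 := by simp [hl]
  have h0 : PySem.List.pyRange 0 (l.length : Int) 1
      = 0 :: PySem.List.pyRange 1 (l.length : Int) 1 := by
    rw [show (0 : Int) = ((0 : Nat) : Int) by rfl, PySem.List.pyRange_one_cons (by omega)]
    norm_num
  rw [h0]
  have hget0 : PySem.List.pyGet? l 0 = some '=' := by simp [hl, PySem.List.pyGet?_zero_cons]
  show aGo l (0 :: PySem.List.pyRange 1 (l.length : Int) 1) = _
  simp only [aGo, hget0]
  rw [if_neg (by decide : ¬ ('=' ∈ alphaA))]
  have h1 : aGo l (PySem.List.pyRange (1 : Int) (l.length : Int) 1) = aScan '=' (l.drop 1) := by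
    have := aGo_eq_aScan (l.length - 1) l 1 '=' rfl (by omega) (by omega) (by simp [hl])
    simpa using this
  rw [h1]
  have hdrop : l.drop 1 = cs ++ ['='] := by simp [hl]
  rw [hdrop, aScan_eq_bGo cs '=' (fun h => absurd h (by decide))]
  rw [show PySem.Chars.islower '=' = false by decide]
  exact bGo_prev_irrel cs false (some '=') none (by decide) (by decide)
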